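-- pv_equiv track=rewrite | github.com/spraakbanken/paradigmextract | src/paradigmextract/pextract.py | _evalfact
-- ===== SOURCE A (Python) =====
-- def _evalfact(lcs, c):
--     """Input: a list of variable-bracketed strings, the known LCS
--        Output: number of variables needed and the variables themselves in a list."""
--     allbreaks = []
--     for w in c:
--         breaks = [0] * len(lcs)
--         p = 0
--         inside = 0
--         for pos in w:
--             if pos == u'[':
--                 inside = 1
--             elif pos == u']':
--                 inside = 0
--                 breaks[p - 1] = 1
--             else:
--                 if inside:
--                     p += 1
--
--         allbreaks.append(breaks)
--     finalbreaks = [0] * len(lcs)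
--     for br in allbreaks:
--         for idx, val in enumerate(br):
--             if val == 1:
--                 finalbreaks[idx] = 1
--
--     # Extract vars
--     variables = []
--     currvar = u''
--     for idx, val in enumerate(lcs):
--         currvar += lcs[idx]
--         if finalbreaks[idx] == 1:
--             variables.append(currvar)
--             currvar = u''
--
--     numvars = sum(finalbreaks)
--     return numvars, variables
-- ===== SOURCE B (Python) =====
-- def _evalfact(lcs, c):
--     finalbreaks = [0] * len(lcs)
--     for w in c:
--         p = 0
--         inside = 0
--         for pos in w:
--             if pos == u'[':
--                 inside = 1
--             elif pos == u']':
--                 inside = 0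
--                 finalbreaks[p - 1] = 1
--             else:
--                 if inside:
--                     p += 1
--     cut = [i for i, v in enumerate(finalbreaks) if v]
--     variables = []
--     prev = 0
--     for i in cut:
--         variables.append(lcs[prev:i + 1])
--         prev = i + 1
--     return len(cut), variables
-- ===== Notes on version B (the rewrite author's own statement) =====
-- stated objective: simpler
-- what changed: B drops the per-word breaks arrays and the separate combine loop by OR-ing break positions into a single finalbreaks array during the one scan, and builds the variables by slicing lcs between consecutive recorded cut indices instead of accumulating characters one by one; numvars is the number of cut indices.
import Mathlib
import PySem

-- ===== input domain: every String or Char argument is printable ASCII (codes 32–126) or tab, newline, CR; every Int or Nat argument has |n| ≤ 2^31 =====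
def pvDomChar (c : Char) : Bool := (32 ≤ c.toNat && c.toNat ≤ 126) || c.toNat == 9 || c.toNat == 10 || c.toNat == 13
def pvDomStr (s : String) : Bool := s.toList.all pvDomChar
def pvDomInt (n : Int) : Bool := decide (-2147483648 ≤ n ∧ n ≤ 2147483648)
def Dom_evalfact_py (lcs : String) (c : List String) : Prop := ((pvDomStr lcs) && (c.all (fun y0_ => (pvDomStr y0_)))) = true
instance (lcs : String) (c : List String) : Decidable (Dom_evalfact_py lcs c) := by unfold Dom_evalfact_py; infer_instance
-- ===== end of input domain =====

-- B merges break positions into one finalbreaks array during the single scan (no per-word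
-- arrays, no combine pass) and builds the variables by slicing lcs at the cut indices:
-- a simpler decomposition of the same computation; return value equivalence only.


-- ===== PORT A =====
-- the inner character loop, textually identical in A and B (state: breaks array, p, inside);
-- the write breaks[p-1] = 1 is pySetD: where Python would raise IndexError (excluded by Pre_)
-- it leaves the list unchanged
def pvWordStep (st : List Int × Int × Int) (ch : Char) : List Int × Int × Int :=
  if ch = '[' then (st.1, st.2.1, 1)
  else if ch = ']' then (PySem.List.pySetD st.1 (st.2.1 - 1) 1, st.2.1, 0)
  else if st.2.2 ≠ 0 then (st.1, st.2.1 + 1, st.2.2)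
  else st

def evalfact_py (lcs : String) (c : List String) : Int × List String :=
  let allbreaks := c.foldl
    (fun acc w => acc ++ [(w.toList.foldl pvWordStep (List.replicate lcs.toList.length 0, 0, 0)).1]) []
  let finalbreaks := allbreaks.foldl
    (fun fb br => (PySem.List.enumerate br 0).foldl
      (fun fb2 iv => if iv.2 = 1 then PySem.List.pySetD fb2 iv.1 1 else fb2) fb)
    (List.replicate lcs.toList.length 0)
  -- currvar += lcs[idx]: the indexed character is the enumerated one (iv.2)
  let ext := (PySem.List.enumerate lcs.toList 0).foldl
    (fun (st : List String × List Char) iv =>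
      let curr := st.2 ++ [iv.2]
      if PySem.List.pyGetD finalbreaks iv.1 0 = (1 : Int) then (st.1 ++ [String.ofList curr], []) else (st.1, curr))
    ([], [])
  (finalbreaks.foldl (· + ·) 0, ext.1)

-- ===== PORT B =====
def evalfact_py_alt (lcs : String) (c : List String) : Int × List String :=
  let fb := c.foldl (fun fb w => (w.toList.foldl pvWordStep (fb, 0, 0)).1)
    (List.replicate lcs.toList.length 0)
  let cut := ((PySem.List.enumerate fb 0).filter (fun iv => iv.2 != 0)).map (·.1)
  let ext := cut.foldl
    (fun (st : Int × List String) i =>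
      (i + 1, st.2 ++ [String.ofList (PySem.List.slice lcs.toList (some st.1) (some (i + 1)))]))
    (0, [])
  ((cut.length : Int), ext.2)

-- ===== PRECONDITION & SPEC =====
-- bounds check: every ']' in a word writes breaks[p-1] with p-1 a valid (possibly -1) index;
-- Pre_ excludes exactly the inputs where Python A raises IndexError (B raises there too)
def pvChk (n : Nat) (p ins : Int) : List Char → Bool
  | [] => true
  | ch :: rest =>
    if ch = '[' then pvChk n p 1 rest
    else if ch = ']' then (decide (-(n : Int) ≤ p - 1 ∧ p - 1 < (n : Int))) && pvChk n p 0 rest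
    else pvChk n (if ins ≠ 0 then p + 1 else p) ins rest

def Pre_evalfact_py (lcs : String) (c : List String) : Prop :=
  c.all (fun w => pvChk lcs.toList.length 0 0 w.toList) = true
instance (lcs : String) (c : List String) : Decidable (Pre_evalfact_py lcs c) := by
  unfold Pre_evalfact_py; infer_instance

def pvWitness_evalfact_py : String × List String := ("ab", ["[a]b", "a[b]"])

def Spec_evalfact_py (lcs : String) (c : List String) (out : Int × List String) : Prop := out = evalfact_py_alt lcs c
instance (lcs : String) (c : List String) (out : Int × List String) : Decidable (Spec_evalfact_py lcs c out) := by unfold Spec_evalfact_py; infer_instance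

-- ===== CLAIM (what is proved, stated in full; the proofs are below) =====
def Claim_equal_evalfact_py : Prop := ∀ (lcs : String) (c : List String), Dom_evalfact_py lcs c → Pre_evalfact_py lcs c → Spec_evalfact_py lcs c (evalfact_py lcs c)

-- ===== LEMMAS AND PROOFS =====

-- pointwise OR (a 1 in g wins, else keep fb's entry): the effect of A's combine loop
def pvOr (fb g : List Int) : List Int := List.zipWith (fun a b => if b = 1 then 1 else a) fb g

-- the segments of l delimited (inclusively) by the 1-positions of fb, with pending prefix curr
def pvSegs : List Char → List Int → List Char → List String
  | [], _, _ => []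
  | _ :: _, [], _ => []
  | ch :: l, b :: fb, curr =>
    if b = 1 then String.ofList (curr ++ [ch]) :: pvSegs l fb [] else pvSegs l fb (curr ++ [ch])

-- every entry is 0 or 1
def pvP (l : List Int) : Prop := ∀ x ∈ l, x = 0 ∨ x = 1

lemma pvOr_length (fb g : List Int) (h : fb.length = g.length) : (pvOr fb g).length = g.length := by
  simp [pvOr, h]

lemma pvOr_replicate (fb : List Int) : pvOr fb (List.replicate fb.length 0) = fb := by
  induction fb with
  | nil => rfl
  | cons a fb ih => simp [pvOr, List.replicate_succ] at ih ⊢; exact ih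

lemma pvOr_set (fb : List Int) : ∀ (g : List Int) (j : Nat), fb.length = g.length →
    (pvOr fb g).set j 1 = pvOr fb (g.set j 1) := by
  induction fb with
  | nil => intro g j h; simp [pvOr]
  | cons a fb ih =>
    intro g j h
    cases g with
    | nil => simp at h
    | cons b g =>
      cases j with
      | zero => simp [pvOr]
      | succ j =>
        simp only [pvOr, List.zipWith_cons_cons, List.set_cons_succ] at *
        rw [ih g j (by simpa using h)]

lemma pvOr_pySetD (fb g : List Int) (i : Int) (h : fb.length = g.length) :
    PySem.List.pySetD (pvOr fb g) i 1 = pvOr fb (PySem.List.pySetD g i 1) := by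
  simp only [PySem.List.pySetD, PySem.List.pySet?, pvOr_length fb g h]
  cases hk : PySem.List.pyIdx? g.length i with
  | none => simp
  | some k => simpa using pvOr_set fb g k h

lemma pvWordStep_length (st : List Int × Int × Int) (ch : Char) :
    (pvWordStep st ch).1.length = st.1.length := by
  unfold pvWordStep
  split_ifs <;> simp [PySem.List.length_pySetD]

lemma pvScan_length (w : List Char) : ∀ (g : List Int) (p ins : Int),
    (w.foldl pvWordStep (g, p, ins)).1.length = g.length := by
  induction w with
  | nil => intro g p ins; rfl
  | cons ch w ih =>
    intro g p ins
    have h := pvWordStep_length (g, p, ins) ch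
    simp only [List.foldl_cons]
    rcases hs : pvWordStep (g, p, ins) ch with ⟨g', p', ins'⟩
    rw [hs] at h
    simpa using (ih g' p' ins').trans h

lemma pvScan_zipOr (fb : List Int) (w : List Char) : ∀ (g : List Int) (p ins : Int),
    fb.length = g.length →
    w.foldl pvWordStep (pvOr fb g, p, ins) =
      (pvOr fb (w.foldl pvWordStep (g, p, ins)).1,
       (w.foldl pvWordStep (g, p, ins)).2.1,
       (w.foldl pvWordStep (g, p, ins)).2.2) := by
  induction w with
  | nil => intro g p ins h; rfl
  | cons ch w ih =>
    intro g p ins h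
    have hstep : pvWordStep (pvOr fb g, p, ins) ch =
        (pvOr fb (pvWordStep (g, p, ins) ch).1,
         (pvWordStep (g, p, ins) ch).2.1, (pvWordStep (g, p, ins) ch).2.2) := by
      unfold pvWordStep
      split_ifs <;> simp [pvOr_pySetD fb g _ h]
    have hlen : fb.length = (pvWordStep (g, p, ins) ch).1.length := by
      rw [pvWordStep_length]; exact h
    rcases hs : pvWordStep (g, p, ins) ch with ⟨g', p', ins'⟩
    rw [hs] at hstep hlen
    simp only [List.foldl_cons, hstep, hs]
    exact ih g' p' ins' hlen

-- A's combine loop over one breaks row equals pointwise OR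
lemma pvMerge_aux (br : List Int) : ∀ (pre fb : List Int), fb.length = br.length →
    (PySem.List.enumerate br (pre.length : Int)).foldl
      (fun fb2 iv => if iv.2 = 1 then PySem.List.pySetD fb2 iv.1 1 else fb2) (pre ++ fb)
    = pre ++ pvOr fb br := by
  induction br with
  | nil =>
    intro pre fb h
    have hfb : fb = [] := by simpa using h
    simp [hfb, pvOr, PySem.List.enumerate]
  | cons b br ih =>
    intro pre fb h
    cases fb with
    | nil => simp at h
    | cons f fb =>
      rw [PySem.List.enumerate_cons, List.foldl_cons]
      have hset : (if b = 1 then PySem.List.pySetD (pre ++ f :: fb) (pre.length : Int) 1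
          else pre ++ f :: fb) = (pre ++ [if b = 1 then (1 : Int) else f]) ++ fb := by
        split_ifs with hb
        · rw [PySem.List.pySetD_natCast]
          simp [List.append_assoc]
        · simp [List.append_assoc]
      have hcast : (pre.length : Int) + 1 = ((pre ++ [if b = 1 then (1 : Int) else f]).length : Int) := by
        simp
      rw [hset, hcast, ih (pre ++ [if b = 1 then (1 : Int) else f]) fb (by simpa using h)]
      simp [pvOr, List.append_assoc]

-- A's finalbreaks chain equals B's in-place scan chain
lemma pvChain_eq (n : Nat) (cs : List String) : ∀ (fb : List Int), fb.length = n →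
    cs.foldl (fun fb w => (PySem.List.enumerate
        ((w.toList.foldl pvWordStep (List.replicate n 0, 0, 0)).1) 0).foldl
        (fun fb2 iv => if iv.2 = 1 then PySem.List.pySetD fb2 iv.1 1 else fb2) fb) fb
    = cs.foldl (fun fb w => (w.toList.foldl pvWordStep (fb, 0, 0)).1) fb := by
  induction cs with
  | nil => intro fb _; rfl
  | cons w cs ih =>
    intro fb hn
    simp only [List.foldl_cons]
    have hbrk : ((w.toList.foldl pvWordStep (List.replicate n 0, 0, 0)).1).length = n := by
      rw [pvScan_length]; simp
    have hmerge := pvMerge_aux ((w.toList.foldl pvWordStep (List.replicate n 0, 0, 0)).1)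
      [] fb (by rw [hbrk, hn])
    simp only [List.nil_append, List.length_nil, Nat.cast_zero] at hmerge
    have hOr : pvOr fb (List.replicate n 0) = fb := by rw [← hn]; exact pvOr_replicate fb
    have hscan := pvScan_zipOr fb w.toList (List.replicate n 0) 0 0 (by simp [hn])
    rw [hOr] at hscan
    have hBstep : (w.toList.foldl pvWordStep (fb, 0, 0)).1
        = pvOr fb ((w.toList.foldl pvWordStep (List.replicate n 0, 0, 0)).1) := by
      rw [hscan]
    rw [hmerge, ← hBstep]
    exact ih _ (by rw [pvScan_length, hn])

lemma pvP_pySetD (l : List Int) (i : Int) (h : pvP l) : pvP (PySem.List.pySetD l i 1) := by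
  simp only [PySem.List.pySetD, PySem.List.pySet?]
  cases hk : PySem.List.pyIdx? l.length i with
  | none => simpa using h
  | some k =>
    intro x hx
    simp only [Option.getD_some, Option.map_some] at hx
    rcases List.mem_or_eq_of_mem_set hx with h1 | h1
    · exact h x h1
    · right; exact h1

lemma pvP_scan (w : List Char) : ∀ (g : List Int) (p ins : Int), pvP g →
    pvP ((w.foldl pvWordStep (g, p, ins)).1) := by
  induction w with
  | nil => intro g p ins h; exact h
  | cons ch w ih =>
    intro g p ins h
    have hstep : pvP ((pvWordStep (g, p, ins) ch).1) := by
      unfold pvWordStep; split_ifs <;> simp <;> first | exact pvP_pySetD g _ h | exact h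
    rcases hs : pvWordStep (g, p, ins) ch with ⟨g', p', ins'⟩
    rw [hs] at hstep
    simpa [List.foldl_cons, hs] using ih g' p' ins' hstep

lemma pvP_chain (cs : List String) : ∀ (fb : List Int), pvP fb →
    pvP (cs.foldl (fun fb w => (w.toList.foldl pvWordStep (fb, 0, 0)).1) fb) := by
  induction cs with
  | nil => intro fb h; exact h
  | cons w cs ih =>
    intro fb h
    simpa using ih _ (pvP_scan w.toList fb 0 0 h)

lemma pvChain_length (cs : List String) : ∀ (fb : List Int),
    (cs.foldl (fun fb w => (w.toList.foldl pvWordStep (fb, 0, 0)).1) fb).length = fb.length := by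
  induction cs with
  | nil => intro fb; rfl
  | cons w cs ih =>
    intro fb
    simpa [pvScan_length] using ih ((w.toList.foldl pvWordStep (fb, 0, 0)).1)

-- A's character-accumulating extraction produces the segments
lemma pvExtA (l : List Char) : ∀ (fb preB : List Int) (curr : List Char) (acc : List String),
    fb.length = l.length →
    ∃ rest, (PySem.List.enumerate l (preB.length : Int)).foldl
      (fun (st : List String × List Char) iv =>
        if PySem.List.pyGetD (preB ++ fb) iv.1 0 = 1
        then (st.1 ++ [String.ofList (st.2 ++ [iv.2])], ([] : List Char)) else (st.1, st.2 ++ [iv.2]))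
      (acc, curr)
    = (acc ++ pvSegs l fb curr, rest) := by
  induction l with
  | nil => intro fb preB curr acc h; exact ⟨curr, by simp [PySem.List.enumerate, pvSegs]⟩
  | cons ch l ih =>
    intro fb preB curr acc h
    cases fb with
    | nil => simp at h
    | cons b fb =>
      rw [PySem.List.enumerate_cons, List.foldl_cons]
      have hget : PySem.List.pyGetD (preB ++ b :: fb) (preB.length : Int) 0 = b := by
        rw [PySem.List.pyGetD_natCast]
        simp [List.getD]
      have hcast : (preB.length : Int) + 1 = ((preB ++ [b]).length : Int) := by simp
      rw [hcast]
      simp only [hget]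
      by_cases hb : b = 1
      · rw [if_pos hb]
        rcases ih fb (preB ++ [b]) [] (acc ++ [String.ofList (curr ++ [ch])]) (by simpa using h)
          with ⟨rest, hr⟩
        simp only [List.append_assoc, List.singleton_append] at hr ⊢
        exact ⟨rest, by rw [hr]; simp [pvSegs, hb]⟩
      · rw [if_neg hb]
        rcases ih fb (preB ++ [b]) (curr ++ [ch]) acc (by simpa using h) with ⟨rest, hr⟩
        simp only [List.append_assoc, List.singleton_append] at hr ⊢
        exact ⟨rest, by rw [hr]; simp [pvSegs, hb]⟩

-- B's slice-at-cut-indices extraction produces the same segments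
lemma pvExtB (fb : List Int) : ∀ (l pre curr : List Char) (acc : List String),
    fb.length = l.length → pvP fb →
    ((((PySem.List.enumerate fb ((pre.length + curr.length : Nat) : Int)).filter
        (fun iv => iv.2 != 0)).map (·.1)).foldl
      (fun (st : Int × List String) i =>
        (i + 1, st.2 ++ [String.ofList (PySem.List.slice (pre ++ curr ++ l) (some st.1) (some (i + 1)))]))
      ((pre.length : Int), acc)).2 = acc ++ pvSegs l fb curr := by
  induction fb with
  | nil =>
    intro l pre curr acc h hp
    rw [List.length_eq_zero_iff.mp h.symm]
    simp [PySem.List.enumerate, pvSegs]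
  | cons b fb ih =>
    intro l pre curr acc h hp
    cases l with
    | nil => simp at h
    | cons ch l =>
      rw [PySem.List.enumerate_cons]
      have hptail : pvP fb := fun x hx => hp x (List.mem_cons_of_mem _ hx)
      rcases hp b (by simp) with hb | hb <;> subst hb
      · -- b = 0: no cut here, the pending curr grows by ch
        simp only [List.filter_cons, bne_self_eq_false, Bool.false_eq_true, if_false]
        have hcast : ((pre.length + curr.length : Nat) : Int) + 1
            = ((pre.length + (curr ++ [ch]).length : Nat) : Int) := by
          simp only [List.length_append, List.length_cons, List.length_nil]
          push_cast; ring
        rw [hcast]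
        have hih := ih l pre (curr ++ [ch]) acc (by simpa using h) hptail
        simp only [List.append_assoc, List.singleton_append] at hih ⊢
        rw [hih]
        simp [pvSegs]
      · -- b = 1: cut at this position, slice out curr ++ [ch]
        have hc : ((((pre.length + curr.length : Nat) : Int), (1 : Int)).2 != 0) = true := rfl
        simp only [List.filter_cons, hc, if_true, List.map_cons, List.foldl_cons]
        have hslice : PySem.List.slice (pre ++ curr ++ (ch :: l)) (some (pre.length : Int))
            (some (((pre.length + curr.length : Nat) : Int) + 1))
            = curr ++ [ch] := by
          have e1 : ((pre.length + curr.length : Nat) : Int) + 1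
              = ((pre.length + curr.length + 1 : Nat) : Int) := by push_cast; ring
          rw [e1, PySem.List.slice_natCast]
          have h1 : (pre ++ curr ++ (ch :: l)).drop pre.length = curr ++ (ch :: l) := by
            rw [List.append_assoc, List.drop_append_of_le_length (by simp)]
            simp
          rw [h1, show curr ++ (ch :: l) = (curr ++ [ch]) ++ l by simp,
            show pre.length + curr.length + 1 - pre.length = (curr ++ [ch]).length by simp; omega,
            List.take_left]
        have hprev : ((pre.length + curr.length : Nat) : Int) + 1
            = (((pre ++ curr ++ [ch]).length : Nat) : Int) := by push_cast; simp; ring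
        have hih := ih l (pre ++ curr ++ [ch]) [] (acc ++ [String.ofList (curr ++ [ch])])
          (by simpa using h) hptail
        simp only [List.append_nil, List.length_nil, Nat.add_zero] at hih
        rw [hprev] at hslice ⊢
        rw [hslice]
        simp only [List.append_assoc, List.singleton_append] at hih ⊢
        rw [hih]
        simp [pvSegs]

lemma pvFoldlAdd (l : List Int) : ∀ (a : Int), l.foldl (· + ·) a = a + l.sum := by
  induction l with
  | nil => intro a; simp
  | cons b l ih => intro a; simp only [List.foldl_cons, List.sum_cons, ih]; ring

-- numvars: the 0/1 sum equals the number of cut indices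
lemma pvCut_length (fb : List Int) : ∀ (s : Int), pvP fb →
    ((((PySem.List.enumerate fb s).filter (fun iv => iv.2 != 0)).map (·.1)).length : Int)
    = fb.foldl (· + ·) 0 := by
  induction fb with
  | nil => intro s _; simp [PySem.List.enumerate]
  | cons b fb ih =>
    intro s hp
    have htail := ih (s + 1) (fun x hx => hp x (List.mem_cons_of_mem _ hx))
    have hsum : (b :: fb).foldl (· + ·) 0 = b + fb.foldl (· + ·) 0 := by
      rw [pvFoldlAdd (b :: fb) 0, pvFoldlAdd fb 0, List.sum_cons]; ring
    rw [PySem.List.enumerate_cons, List.filter_cons, hsum]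
    rcases hp b (by simp) with h0 | h1
    · subst h0
      simp only [bne_self_eq_false, Bool.false_eq_true, if_false]
      rw [htail]; ring
    · subst h1
      simp only [show ((1 : Int) != 0) = true from rfl, if_true, List.map_cons, List.length_cons]
      push_cast
      rw [htail]; ring

-- ===== VERDICT (by name: the statement is the Claim_ definition above) =====
theorem evalfact_py_spec : Claim_equal_evalfact_py := by
  intro lcs c _ _
  unfold Spec_evalfact_py evalfact_py evalfact_py_alt
  simp only [PySem.List.foldl_append_singleton_eq_map, List.nil_append, List.foldl_map]
  rw [pvChain_eq lcs.toList.length c (List.replicate lcs.toList.length 0) (by simp)]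
  set fb := c.foldl (fun fb w => (w.toList.foldl pvWordStep (fb, 0, 0)).1)
    (List.replicate lcs.toList.length 0) with hfb
  have hP : pvP fb := pvP_chain c _ (by intro x hx; left; exact (List.eq_of_mem_replicate hx))
  have hlen : fb.length = lcs.toList.length := by
    rw [hfb]; simpa using pvChain_length c (List.replicate lcs.toList.length 0)
  refine Prod.ext ?_ ?_
  · -- numvars
    simpa using (pvCut_length fb 0 hP).symm
  · -- variables
    rcases pvExtA lcs.toList fb [] [] [] (by rw [hlen]) with ⟨rest, hr⟩
    simp only [List.nil_append, List.length_nil, Nat.cast_zero] at hr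
    have hr1 := congrArg Prod.fst hr
    have hB := pvExtB fb lcs.toList [] [] [] (by rw [hlen]) hP
    simp only [List.nil_append, List.length_nil, Nat.cast_zero, Nat.add_zero,
      List.foldl_map] at hB
    exact hr1.trans hB.symm
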